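-- pv_equiv track=rewrite | github.com/MrGoodKitten/onyx-platform | Downloads/Zeys_EmailScanner_Deploy/email_scanner.py | parse_email_body
-- ===== SOURCE A (Python) =====
-- def parse_email_body(body):
--     eth_value = None
--     wallet = None
--     asset = None
--     for line in body.split("\n"):
--         if 'ETH' in line:
--             eth_value = ''.join([c for c in line if c.isdigit() or c == '.'])
--         if '0x' in line:
--             wallet = line.strip()
--         if 'Bored Ape' in line:
--             asset = line.strip()
--     return eth_value, wallet, asset
-- ===== SOURCE B (Python) =====
-- def parse_email_body(body):
--     lines = body.split("\n")
--     eth_lines = [l for l in lines if 'ETH' in l]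
--     eth_value = ''.join(c for c in eth_lines[-1] if c.isdigit() or c == '.') if eth_lines else None
--     wallet_lines = [l for l in lines if '0x' in l]
--     wallet = wallet_lines[-1].strip() if wallet_lines else None
--     asset_lines = [l for l in lines if 'Bored Ape' in l]
--     asset = asset_lines[-1].strip() if asset_lines else None
--     return eth_value, wallet, asset
-- ===== Notes on version B (the rewrite author's own statement) =====
-- stated objective: alternative
-- what changed: Replaces the single stateful loop that updates three variables with three independent per-field filters over the split lines, each field taken from the last matching line.
import Mathlib
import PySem

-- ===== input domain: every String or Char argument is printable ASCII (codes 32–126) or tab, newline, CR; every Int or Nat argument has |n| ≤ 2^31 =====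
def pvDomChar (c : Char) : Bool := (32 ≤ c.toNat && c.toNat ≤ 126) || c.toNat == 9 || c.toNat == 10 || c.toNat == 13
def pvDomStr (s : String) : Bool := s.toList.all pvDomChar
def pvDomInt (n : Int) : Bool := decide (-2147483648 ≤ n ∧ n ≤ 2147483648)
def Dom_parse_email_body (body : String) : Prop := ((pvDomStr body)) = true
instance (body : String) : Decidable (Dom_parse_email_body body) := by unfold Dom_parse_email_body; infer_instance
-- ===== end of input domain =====

-- B replaces A's single stateful loop over the lines (three variables updated in place)
-- by three independent per-field filters, each field taken from its last matching line (objective: alternative).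

-- ===== PORT A =====
-- ''.join([c for c in line if c.isdigit() or c == '.'])
def pvEthDigits (line : List Char) : String :=
  String.ofList (line.filter (fun c => PySem.Chars.isdigit c || c == '.'))

-- the loop body: three sequential ifs updating the (eth_value, wallet, asset) state
def pvStepA (st : Option String × Option String × Option String) (line : List Char) :
    Option String × Option String × Option String :=
  let st := if PySem.Chars.isIn "ETH".toList line then (some (pvEthDigits line), st.2.1, st.2.2) else st
  let st := if PySem.Chars.isIn "0x".toList line then (st.1, some (String.ofList (PySem.Chars.strip line)), st.2.2) else st
  if PySem.Chars.isIn "Bored Ape".toList line then (st.1, st.2.1, some (String.ofList (PySem.Chars.strip line))) else st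

def parse_email_body (body : String) : Option String × Option String × Option String :=
  (PySem.Chars.splitOn body.toList "\n".toList).foldl pvStepA (none, none, none)

-- ===== PORT B =====
-- matching_lines[-1] for one field: the last line containing sub, if any
def pvLastMatch (sub : List Char) (lines : List (List Char)) : Option (List Char) :=
  (lines.filter (fun l => PySem.Chars.isIn sub l)).getLast?

def parse_email_body_alt (body : String) : Option String × Option String × Option String :=
  let lines := PySem.Chars.splitOn body.toList "\n".toList
  ((pvLastMatch "ETH".toList lines).map pvEthDigits,
   (pvLastMatch "0x".toList lines).map (fun l => String.ofList (PySem.Chars.strip l)),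
   (pvLastMatch "Bored Ape".toList lines).map (fun l => String.ofList (PySem.Chars.strip l)))

-- ===== PRECONDITION & SPEC =====
def Spec_parse_email_body (body : String) (out : Option String × Option String × Option String) : Prop := out = parse_email_body_alt body
instance (body : String) (out : Option String × Option String × Option String) : Decidable (Spec_parse_email_body body out) := by unfold Spec_parse_email_body; infer_instance

-- ===== CLAIM (what is proved, stated in full; the proofs are below) =====
def Claim_equal_parse_email_body : Prop := ∀ (body : String), Dom_parse_email_body body → Spec_parse_email_body body (parse_email_body body)

-- ===== LEMMAS AND PROOFS =====

-- a "last-match-wins" single-variable loop computes the last element of the filtered list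
theorem foldl_if_some_eq_getLast? {α β : Type} (p : α → Bool) (f : α → β) :
    ∀ (xs : List α) (init : Option β),
      xs.foldl (fun s l => if p l then some (f l) else s) init
        = ((xs.filter p).getLast?).elim init (fun l => some (f l)) := by
  intro xs
  induction xs with
  | nil => intro init; rfl
  | cons x xs ih =>
    intro init
    by_cases h : p x = true
    · simp only [List.foldl_cons, List.filter_cons, h, ite_true]
      rw [ih]
      cases hf : xs.filter p with
      | nil => simp
      | cons y ys =>
        have hs : ((y :: ys).getLast?).isSome := by simp
        obtain ⟨z, hz⟩ := Option.isSome_iff_exists.mp hs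
        rw [List.getLast?_cons_cons, hz]; rfl
    · simp only [List.foldl_cons, List.filter_cons, h]
      simp only [Bool.false_eq_true, ite_false]
      exact ih init

-- the three state components of A's loop evolve independently
theorem foldl_stepA_split :
    ∀ (lines : List (List Char)) (e w a : Option String),
      lines.foldl pvStepA (e, w, a)
        = (lines.foldl (fun s l => if PySem.Chars.isIn "ETH".toList l then some (pvEthDigits l) else s) e,
           lines.foldl (fun s l => if PySem.Chars.isIn "0x".toList l then some (String.ofList (PySem.Chars.strip l)) else s) w,
           lines.foldl (fun s l => if PySem.Chars.isIn "Bored Ape".toList l then some (String.ofList (PySem.Chars.strip l)) else s) a) := by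
  intro lines
  induction lines with
  | nil => intro e w a; rfl
  | cons x xs ih =>
    intro e w a
    simp only [List.foldl_cons]
    rw [show pvStepA (e, w, a) x
          = (if PySem.Chars.isIn "ETH".toList x then some (pvEthDigits x) else e,
             if PySem.Chars.isIn "0x".toList x then some (String.ofList (PySem.Chars.strip x)) else w,
             if PySem.Chars.isIn "Bored Ape".toList x then some (String.ofList (PySem.Chars.strip x)) else a) from by
      simp only [pvStepA]; split_ifs <;> rfl]
    exact ih _ _ _

theorem elim_none_eq_map {α β : Type} (f : α → β) (o : Option α) :
    o.elim none (fun l => some (f l)) = o.map f := by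
  cases o <;> rfl

-- ===== VERDICT (by name: the statement is the Claim_ definition above) =====
theorem parse_email_body_spec : Claim_equal_parse_email_body := by
  intro body _
  show parse_email_body body = parse_email_body_alt body
  unfold parse_email_body parse_email_body_alt pvLastMatch
  rw [foldl_stepA_split]
  rw [foldl_if_some_eq_getLast?, foldl_if_some_eq_getLast?, foldl_if_some_eq_getLast?]
  rw [elim_none_eq_map, elim_none_eq_map, elim_none_eq_map]
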